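-- pv_equiv track=rewrite | github.com/nikaasanashvili/GOA-homeworks40-2- | level_013/homework/hw.py | xmovnebi_tanxmovnebi
-- ===== SOURCE A (Python) =====
-- def xmovnebi_tanxmovnebi(txt):
--     xmovnebi="aeiou"
--     tanxmovnebi='bsdfghjklmnpqrstwxvz'
--     filtre_txt=''
--     for i in txt:
--         if i.lower() in xmovnebi:
--             filtre_txt += '!'
--         elif i.lower() in tanxmovnebi:
--             filtre_txt += '*'
--         else:
--             filtre_txt += i
--     return filtre_txt
-- ===== SOURCE B (Python) =====
-- def xmovnebi_tanxmovnebi(txt):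
--     # staged whole-string passes: iterate over the ALPHABET, not over txt;
--     # correct because '!' and '*' are not letters, so later passes never touch earlier output
--     for v in "aeiouAEIOU":
--         txt = txt.replace(v, "!")
--     for c in "bsdfghjklmnpqrstwxvzBSDFGHJKLMNPQRSTWXVZ":
--         txt = txt.replace(c, "*")
--     return txt
-- ===== Notes on version B (the rewrite author's own statement) =====
-- stated objective: faster
-- what changed: Instead of one pass over the text with a per-character if/elif/else, B loops over the 60 relevant letters and rewrites the whole string with str.replace once per letter (staged whole-string passes, each in C); correct because the replacement symbols are not letters, so later passes cannot disturb earlier output.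
import Mathlib
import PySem

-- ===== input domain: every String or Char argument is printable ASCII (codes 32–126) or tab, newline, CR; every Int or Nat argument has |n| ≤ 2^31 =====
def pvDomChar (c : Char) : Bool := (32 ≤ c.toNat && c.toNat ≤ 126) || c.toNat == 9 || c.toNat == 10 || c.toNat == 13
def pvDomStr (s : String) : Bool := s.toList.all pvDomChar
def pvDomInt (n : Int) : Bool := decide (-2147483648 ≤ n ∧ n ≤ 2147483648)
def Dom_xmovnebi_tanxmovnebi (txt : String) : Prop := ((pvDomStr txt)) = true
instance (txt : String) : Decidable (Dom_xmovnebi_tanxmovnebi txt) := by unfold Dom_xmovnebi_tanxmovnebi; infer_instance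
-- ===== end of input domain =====

-- B replaces A's single pass over the text (per-character if/elif/else) by staged
-- whole-string passes: one str.replace over the whole text per letter of the alphabet
-- (objective: alternative; same result because '!'/'*' are not letters).

-- ===== PORT A =====
-- literal port: loop over the characters, appending '!' / '*' / the character itself
def xmovnebi_tanxmovnebi (txt : String) : String :=
  let xmovnebi := "aeiou".toList
  let tanxmovnebi := "bsdfghjklmnpqrstwxvz".toList
  let filtre_txt : List Char :=
    txt.toList.foldl (fun acc i =>
      if PySem.Chars.isIn [PySem.Chars.lowerChar i] xmovnebi then acc ++ ['!']
      else if PySem.Chars.isIn [PySem.Chars.lowerChar i] tanxmovnebi then acc ++ ['*']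
      else acc ++ [i]) []
  String.ofList filtre_txt

-- ===== PORT B =====
-- literal port of Source B: fold str.replace over the vowel letters, then over the consonant letters
def xmovnebi_tanxmovnebi_alt (txt : String) : String :=
  let t1 := "aeiouAEIOU".toList.foldl
    (fun t v => PySem.Str.replace t (String.ofList [v]) "!") txt
  "bsdfghjklmnpqrstwxvzBSDFGHJKLMNPQRSTWXVZ".toList.foldl
    (fun t c => PySem.Str.replace t (String.ofList [c]) "*") t1

-- ===== PRECONDITION & SPEC =====
def Spec_xmovnebi_tanxmovnebi (txt : String) (out : String) : Prop := out = xmovnebi_tanxmovnebi_alt txt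
instance (txt : String) (out : String) : Decidable (Spec_xmovnebi_tanxmovnebi txt out) := by unfold Spec_xmovnebi_tanxmovnebi; infer_instance

-- ===== CLAIM (what is proved, stated in full; the proofs are below) =====
def Claim_equal_xmovnebi_tanxmovnebi : Prop := ∀ (txt : String), Dom_xmovnebi_tanxmovnebi txt → Spec_xmovnebi_tanxmovnebi txt (xmovnebi_tanxmovnebi txt)

-- ===== LEMMAS AND PROOFS =====

-- A's per-character decision, pulled out of the loop
def pvStepA (i : Char) : Char :=
  if PySem.Chars.isIn [PySem.Chars.lowerChar i] "aeiou".toList then '!'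
  else if PySem.Chars.isIn [PySem.Chars.lowerChar i] "bsdfghjklmnpqrstwxvz".toList then '*'
  else i

lemma pvFoldA (l : List Char) (acc : List Char) :
    l.foldl (fun acc i =>
      if PySem.Chars.isIn [PySem.Chars.lowerChar i] "aeiou".toList then acc ++ ['!']
      else if PySem.Chars.isIn [PySem.Chars.lowerChar i] "bsdfghjklmnpqrstwxvz".toList then acc ++ ['*']
      else acc ++ [i]) acc = acc ++ l.map pvStepA := by
  induction l generalizing acc with
  | nil => simp
  | cons c t ih =>
    simp only [List.foldl_cons, List.map_cons, ih, pvStepA]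
    split_ifs <;> simp

-- single-character replace is a map
lemma pvGoSingle (o n : Char) (fuel : Nat) (l acc : List Char) (h : l.length ≤ fuel) :
    PySem.Chars.replace.go [o] [n] fuel l acc
      = acc.reverse ++ l.map (fun c => if c = o then n else c) := by
  induction fuel generalizing l acc with
  | zero =>
    have : l = [] := List.length_eq_zero_iff.mp (Nat.le_zero.mp h)
    subst this; simp [PySem.Chars.replace.go]
  | succ k ih =>
    cases l with
    | nil => simp [PySem.Chars.replace.go]
    | cons c t =>
      rw [PySem.Chars.replace.go]
      by_cases hc : c = o
      · subst hc
        have hp : List.isPrefixOf [c] (c :: t) = true := by simp [List.isPrefixOf]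
        simp only [hp, if_true, List.length_cons] at *
        rw [ih _ _ (by simpa using Nat.le_of_succ_le_succ h)]
        simp
      · have hp : List.isPrefixOf [o] (c :: t) = false := by
          simp [List.isPrefixOf]; exact fun e => absurd e.symm hc
        simp only [hp, Bool.false_eq_true, if_false]
        rw [ih _ _ (by simpa using Nat.le_of_succ_le_succ h)]
        simp [hc]

lemma pvReplaceSingle (o n : Char) (cs : List Char) :
    PySem.Chars.replace cs [o] [n] = cs.map (fun c => if c = o then n else c) := by
  rw [PySem.Chars.replace]
  simp only [List.isEmpty_cons, Bool.false_eq_true, if_false]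
  exact pvGoSingle o n cs.length cs [] le_rfl

-- a fold of single-character replaces is one map of the folded per-character function
lemma pvFoldRepl (ls : List Char) (d : Char) (s : String) :
    (ls.foldl (fun t v => PySem.Str.replace t (String.ofList [v]) (String.ofList [d])) s).toList
      = s.toList.map (fun c => ls.foldl (fun x v => if x = v then d else x) c) := by
  induction ls generalizing s with
  | nil => simp
  | cons v t ih =>
    simp only [List.foldl_cons, ih]
    have h1 : (PySem.Str.replace s (String.ofList [v]) (String.ofList [d])).toList
        = s.toList.map (fun c => if c = v then d else c) := by
      rw [PySem.Str.toList_replace]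
      simpa using pvReplaceSingle v d s.toList
    rw [h1, List.map_map]
    rfl

-- B's composed per-character function
def pvStepB (c : Char) : Char :=
  "bsdfghjklmnpqrstwxvzBSDFGHJKLMNPQRSTWXVZ".toList.foldl
    (fun x v => if x = v then '*' else x)
    ("aeiouAEIOU".toList.foldl (fun x v => if x = v then '!' else x) c)

-- on every domain character the two per-character decisions agree (all 128 ASCII codes)
set_option maxRecDepth 8192 in
lemma pvStep_eq_ascii :
    ((List.range 128).all (fun n => pvStepA (Char.ofNat n) == pvStepB (Char.ofNat n))) = true := by
  decide

lemma pvStep_eq (c : Char) (h : pvDomChar c = true) : pvStepA c = pvStepB c := by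
  have hlt : c.toNat < 128 := by simp [pvDomChar] at h; omega
  have h2 := List.all_eq_true.mp pvStep_eq_ascii c.toNat (List.mem_range.mpr hlt)
  rw [Char.ofNat_toNat] at h2
  exact beq_iff_eq.mp h2

-- B's two fold loops compute one map of pvStepB over the characters
set_option maxHeartbeats 1000000 in
lemma pvAltToList (txt : String) :
    (xmovnebi_tanxmovnebi_alt txt).toList = txt.toList.map pvStepB := by
  unfold xmovnebi_tanxmovnebi_alt
  have e1 : ("!" : String) = String.ofList ['!'] := rfl
  have e2 : ("*" : String) = String.ofList ['*'] := rfl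
  rw [e1, e2,
      pvFoldRepl "bsdfghjklmnpqrstwxvzBSDFGHJKLMNPQRSTWXVZ".toList '*',
      pvFoldRepl "aeiouAEIOU".toList '!', List.map_map]
  simp only [Function.comp_def]
  rfl

-- ===== VERDICT (by name: the statement is the Claim_ definition above) =====
set_option maxRecDepth 8192 in
theorem xmovnebi_tanxmovnebi_spec : Claim_equal_xmovnebi_tanxmovnebi := by
  intro txt hdom
  unfold Spec_xmovnebi_tanxmovnebi xmovnebi_tanxmovnebi
  apply String.ext
  rw [pvAltToList]
  simp only [pvFoldA, List.nil_append, String.toList_ofList]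
  apply List.map_congr_left
  intro c hc
  exact pvStep_eq c (List.all_eq_true.mp hdom c hc)
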